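-- pv_equiv track=rewrite | github.com/hyoeun98/boj | 백준/Silver/9079. 동전 게임/동전 게임.py | board_to_binary
-- ===== SOURCE A (Python) =====
-- def board_to_binary(board):
--     binary = 0
--     cnt = 8
--     for i in board:
--         for j in i:
--             binary += j * (2 ** cnt)
--             cnt -= 1
--     return binary
-- ===== SOURCE B (Python) =====
-- def board_to_binary(board):
--     cells = [c for row in board for c in row]
--     value = 0
--     for c in cells:
--         value = 2 * value + c
--     return value << (9 - len(cells))
-- ===== Notes on version B (the rewrite author's own statement) =====
-- stated objective: alternative
-- what changed: Flattens the board once into a flat cell list, then runs a single Horner accumulator loop (no nested loop, no cnt counter, no per-cell 2**cnt power) followed by one final left shift into the 9-bit frame.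
-- outside the precondition, e.g. on board_to_binary([[1, 0, 0, 0, 0, 0, 0, 0, 0, 1]]): A returns 256.5, B raises ValueError
import Mathlib
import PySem

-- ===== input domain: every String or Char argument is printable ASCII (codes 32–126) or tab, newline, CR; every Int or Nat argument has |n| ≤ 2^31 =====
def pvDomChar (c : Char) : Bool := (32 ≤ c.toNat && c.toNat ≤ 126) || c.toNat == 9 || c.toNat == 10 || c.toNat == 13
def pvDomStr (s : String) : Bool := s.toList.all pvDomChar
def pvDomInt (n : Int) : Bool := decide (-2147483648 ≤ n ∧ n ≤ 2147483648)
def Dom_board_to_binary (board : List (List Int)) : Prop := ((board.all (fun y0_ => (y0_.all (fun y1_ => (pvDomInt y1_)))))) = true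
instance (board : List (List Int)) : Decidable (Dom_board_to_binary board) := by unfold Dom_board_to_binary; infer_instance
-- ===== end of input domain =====

-- B replaces A's nested loop with positional weights (cnt counter and per-cell 2**cnt)
-- by a one-time flatten, a single flat Horner loop and one final left shift (alternative decomposition).


-- ===== PORT A =====
-- state = (binary, cnt); 2 ** cnt ported as 2 ^ cnt.toNat, exact whenever cnt ≥ 0
-- (cnt stays ≥ 0 on every input admitted by Pre_; for cnt < 0 Python's 2**cnt is a float).
def stepA (s : Int × Int) (j : Int) : Int × Int := (s.1 + j * 2 ^ s.2.toNat, s.2 - 1)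

def board_to_binary (board : List (List Int)) : Int :=
  (board.foldl (fun s i => i.foldl stepA s) ((0 : Int), (8 : Int))).1

-- ===== PORT B =====
-- cells = flatten comprehension; one flat Horner loop; 'value << (9 - len cells)'
-- ported as value * 2 ^ (9 - len).toNat, exact whenever len ≤ 9 (Python raises
-- ValueError on a negative shift count; such boards are outside Pre_).
def board_to_binary_alt (board : List (List Int)) : Int :=
  ((board.flatMap (fun row => row)).foldl (fun v c => 2 * v + c) 0)
    * 2 ^ ((9 : Int) - (board.flatMap (fun row => row)).length).toNat

-- ===== PRECONDITION & SPEC =====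
-- Pre_ excludes boards with more than 9 cells: there Python A's 2**cnt (cnt < 0) is a
-- float, so A does not return a value of the declared int type (and B raises ValueError).
def Pre_board_to_binary (board : List (List Int)) : Prop :=
  (board.map List.length).sum ≤ 9
instance (board : List (List Int)) : Decidable (Pre_board_to_binary board) := by
  unfold Pre_board_to_binary; infer_instance

def pvWitness_board_to_binary : List (List Int) := [[1,0,1],[0,1,1],[1,0,0]]

def Spec_board_to_binary (board : List (List Int)) (out : Int) : Prop := out = board_to_binary_alt board
instance (board : List (List Int)) (out : Int) : Decidable (Spec_board_to_binary board out) := by unfold Spec_board_to_binary; infer_instance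

-- ===== CLAIM (what is proved, stated in full; the proofs are below) =====
def Claim_equal_board_to_binary : Prop := ∀ (board : List (List Int)), Dom_board_to_binary board → Pre_board_to_binary board → Spec_board_to_binary board (board_to_binary board)

-- ===== LEMMAS AND PROOFS =====

-- the Horner fold shifts its seed left by one bit per cell
theorem horner_seed (xs : List Int) (b : Int) :
    xs.foldl (fun v c => 2 * v + c) b
      = b * 2 ^ xs.length + xs.foldl (fun v c => 2 * v + c) 0 := by
  induction xs generalizing b with
  | nil => simp
  | cons x xs ih =>
    simp only [List.foldl_cons]
    rw [ih (2 * b + x), ih (2 * 0 + x)]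
    simp [pow_succ]; ring

-- main invariant: A's positional fold equals the Horner value shifted into place
theorem foldA_eq (xs : List Int) (b : Int) (m : Nat) (h : xs.length ≤ m + 1) :
    (xs.foldl stepA (b, (m : Int))).1
      = b + (xs.foldl (fun v c => 2 * v + c) 0) * 2 ^ (m + 1 - xs.length) := by
  induction xs generalizing b m with
  | nil => simp
  | cons x xs ih =>
    simp only [List.foldl_cons, stepA]
    cases m with
    | zero =>
      have hx : xs = [] := by simpa using h
      subst hx; simp
    | succ m' =>
      have hm : ((m' + 1 : Nat) : Int) - 1 = (m' : Int) := by push_cast; ring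
      have hcast : ((((m' : Nat) + 1 : Nat) : Int)).toNat = m' + 1 := by simp
      rw [hcast, hm, ih _ m' (by simpa using h)]
      rw [horner_seed xs (2 * 0 + x)]
      have hl : xs.length ≤ m' + 1 := by simpa using h
      have hp : (2 : Int) ^ xs.length * 2 ^ (m' + 1 - xs.length) = 2 ^ (m' + 1) := by
        rw [← pow_add]; congr 1; omega
      have hlen : m' + 1 + 1 - (x :: xs).length = m' + 1 - xs.length := by
        simp only [List.length_cons]; omega
      rw [hlen]
      push_cast
      calc b + x * 2 ^ (m' + 1)
            + (xs.foldl (fun v c => 2 * v + c) 0) * 2 ^ (m' + 1 - xs.length)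
          = b + (x * (2 ^ xs.length * 2 ^ (m' + 1 - xs.length))
              + (xs.foldl (fun v c => 2 * v + c) 0) * 2 ^ (m' + 1 - xs.length)) := by
            rw [hp]; ring
        _ = b + ((2 * 0 + x) * 2 ^ xs.length + (xs.foldl (fun v c => 2 * v + c) 0))
              * 2 ^ (m' + 1 - xs.length) := by ring

-- ===== VERDICT (by name: the statement is the Claim_ definition above) =====
theorem board_to_binary_spec : Claim_equal_board_to_binary := by
  intro board _ hpre
  unfold Spec_board_to_binary board_to_binary board_to_binary_alt
  rw [← List.foldl_flatten]
  have hflat : board.flatMap (fun row => row) = board.flatten := by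
    simp [List.flatMap_def]
  rw [hflat]
  have hlen : (board.flatten).length ≤ 9 := by
    simpa [List.length_flatten] using hpre
  have h8 : (8 : Int) = ((8 : Nat) : Int) := by norm_num
  rw [h8, foldA_eq board.flatten 0 8 (by omega)]
  have h9 : ((9 : Int) - (board.flatten).length).toNat
      = 8 + 1 - (board.flatten).length := by omega
  rw [h9]
  ring
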